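-- pv_equiv track=rewrite | github.com/Vincenzo-Petrolo/Project-1 | circuit.py | __XNOR__
-- ===== SOURCE A (Python) =====
-- def __XNOR__(inputs_list):
--   if ('X' in inputs_list):
--     return 'X'
--   if  ('U' in inputs_list):
--     return 'U'
--   number_ones = inputs_list.count('1')
--
--   if ("D" in inputs_list or "D'" in inputs_list):
--     # we enter in good/bad simulation
--     # create two lists of inputs, good & bad
--     good_inps = []
--     bad_inps = []
--     for item in inputs_list:
--       if (item == "D"):
--         good_inps.append('1')
--         bad_inps.append('0')
--       elif (item == "D'"):
--         good_inps.append('0')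
--         bad_inps.append('1')
--       else:
--         good_inps.append(item)
--         bad_inps.append(item)
--     # now that we have the two lists
--     good_result = __XNOR__(good_inps)
--     bad_result = __XNOR__(bad_inps)
--
--     # now compare the results to produce the D-algebra result
--     if (good_result == '1' and bad_result == '1'):
--       return '1'
--     elif (good_result == '1' and bad_result == '0'):
--       return 'D'
--     elif (good_result == '0' and bad_result == '1'):
--       return "D'"
--     else:
--       return '0'
--
--   else:
--     # continue with normal simulatio
--     # if the number of ones is even
--     if (number_ones % 2 == 0):
--       return '1'
--     # if the number of ones is odd
--     return '0'
-- ===== SOURCE B (Python) =====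
-- def __XNOR__(inputs_list):
--   if 'X' in inputs_list:
--     return 'X'
--   if 'U' in inputs_list:
--     return 'U'
--   ones = inputs_list.count('1')
--   if "D" in inputs_list or "D'" in inputs_list:
--     good_ones = ones + inputs_list.count('D')
--     bad_ones = ones + inputs_list.count("D'")
--     good_result = '1' if good_ones % 2 == 0 else '0'
--     bad_result = '1' if bad_ones % 2 == 0 else '0'
--     if good_result == '1' and bad_result == '1':
--       return '1'
--     if good_result == '1' and bad_result == '0':
--       return 'D'
--     if good_result == '0' and bad_result == '1':
--       return "D'"
--     return '0'
--   return '1' if ones % 2 == 0 else '0'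
-- ===== Notes on version B (the rewrite author's own statement) =====
-- stated objective: simpler
-- what changed: Replaces the D-branch's construction of two substituted copies of the input and two recursive __XNOR__ calls by direct counting: good/bad parities are computed from counts of '1', 'D' and "D'", so the recursion and both list allocations disappear.
import Mathlib
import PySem

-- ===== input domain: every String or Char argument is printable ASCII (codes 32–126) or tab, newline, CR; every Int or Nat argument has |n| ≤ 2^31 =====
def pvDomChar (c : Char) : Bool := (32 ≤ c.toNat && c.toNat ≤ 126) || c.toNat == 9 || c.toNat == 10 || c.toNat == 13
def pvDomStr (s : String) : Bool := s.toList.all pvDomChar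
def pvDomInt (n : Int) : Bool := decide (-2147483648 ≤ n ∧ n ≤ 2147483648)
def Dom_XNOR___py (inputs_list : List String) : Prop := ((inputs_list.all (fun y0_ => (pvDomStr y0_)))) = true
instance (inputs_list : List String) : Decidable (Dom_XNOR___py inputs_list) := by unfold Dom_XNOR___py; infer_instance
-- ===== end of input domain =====

-- B replaces A's D-branch (build two substituted lists, recurse twice) by direct parity counting; objective: simpler.

-- ===== PORT A =====
-- the good/bad construction loop of A, building both lists in one pass
def pvBuildGB : List String → List String × List String
  | [] => ([], [])
  | item :: rest =>
    let gb := pvBuildGB rest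
    if item = "D" then ("1" :: gb.1, "0" :: gb.2)
    else if item = "D'" then ("0" :: gb.1, "1" :: gb.2)
    else (item :: gb.1, item :: gb.2)

-- termination measure: number of D/D' entries (needed by the port's decreasing_by)
def pvDCount (l : List String) : Nat := (l.filter (fun s => s == "D" || s == "D'")).length

theorem pvBuildGB_fst_dCount (l : List String) : pvDCount (pvBuildGB l).1 = 0 := by
  induction l with
  | nil => rfl
  | cons x xs ih =>
    simp only [pvBuildGB]
    split_ifs with h1 h2 <;> simp_all [pvDCount, List.filter_cons]

theorem pvBuildGB_snd_dCount (l : List String) : pvDCount (pvBuildGB l).2 = 0 := by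
  induction l with
  | nil => rfl
  | cons x xs ih =>
    simp only [pvBuildGB]
    split_ifs with h1 h2 <;> simp_all [pvDCount, List.filter_cons]

theorem pvDCount_pos (l : List String) (h : "D" ∈ l ∨ "D'" ∈ l) : 0 < pvDCount l := by
  unfold pvDCount
  rcases h with h | h
  · exact List.length_pos_of_mem (List.mem_filter.2 ⟨h, by decide⟩)
  · exact List.length_pos_of_mem (List.mem_filter.2 ⟨h, by decide⟩)

def XNOR___py (inputs_list : List String) : String :=
  if "X" ∈ inputs_list then "X"
  else if "U" ∈ inputs_list then "U"
  else
    let number_ones := PySem.List.count inputs_list "1"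
    if h : "D" ∈ inputs_list ∨ "D'" ∈ inputs_list then
      let gb := pvBuildGB inputs_list
      let good_result := XNOR___py gb.1
      let bad_result := XNOR___py gb.2
      if good_result = "1" ∧ bad_result = "1" then "1"
      else if good_result = "1" ∧ bad_result = "0" then "D"
      else if good_result = "0" ∧ bad_result = "1" then "D'"
      else "0"
    else
      if PySem.Int.mod number_ones 2 == 0 then "1" else "0"
termination_by pvDCount inputs_list
decreasing_by
  · have := pvBuildGB_fst_dCount inputs_list
    have := pvDCount_pos inputs_list h
    omega
  · have := pvBuildGB_snd_dCount inputs_list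
    have := pvDCount_pos inputs_list h
    omega

-- ===== PORT B =====
def XNOR___py_alt (inputs_list : List String) : String :=
  if "X" ∈ inputs_list then "X"
  else if "U" ∈ inputs_list then "U"
  else
    let ones := PySem.List.count inputs_list "1"
    if "D" ∈ inputs_list ∨ "D'" ∈ inputs_list then
      let good_ones := ones + PySem.List.count inputs_list "D"
      let bad_ones := ones + PySem.List.count inputs_list "D'"
      let good_result := if PySem.Int.mod good_ones 2 == 0 then "1" else "0"
      let bad_result := if PySem.Int.mod bad_ones 2 == 0 then "1" else "0"
      if good_result = "1" ∧ bad_result = "1" then "1"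
      else if good_result = "1" ∧ bad_result = "0" then "D"
      else if good_result = "0" ∧ bad_result = "1" then "D'"
      else "0"
    else
      if PySem.Int.mod ones 2 == 0 then "1" else "0"

-- ===== PRECONDITION & SPEC =====
def Spec_XNOR___py (inputs_list : List String) (out : String) : Prop := out = XNOR___py_alt inputs_list
instance (inputs_list : List String) (out : String) : Decidable (Spec_XNOR___py inputs_list out) := by unfold Spec_XNOR___py; infer_instance

-- ===== CLAIM (what is proved, stated in full; the proofs are below) =====
def Claim_equal_XNOR___py : Prop := ∀ (inputs_list : List String), Dom_XNOR___py inputs_list → Spec_XNOR___py inputs_list (XNOR___py inputs_list)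

-- ===== LEMMAS AND PROOFS =====

-- the built lists contain exactly the substituted entries
theorem pvBuildGB_eq_maps (l : List String) :
    pvBuildGB l = (l.map (fun s => if s = "D" then "1" else if s = "D'" then "0" else s),
                   l.map (fun s => if s = "D" then "0" else if s = "D'" then "1" else s)) := by
  induction l with
  | nil => rfl
  | cons x xs ih =>
    simp only [pvBuildGB, ih, List.map_cons]
    split_ifs <;> simp_all

theorem pv_not_mem_map_good (l : List String) (v : String)
    (hv1 : v ∉ l) (hv2 : v ≠ "1") (hv3 : v ≠ "0") :
    v ∉ l.map (fun s => if s = "D" then "1" else if s = "D'" then "0" else s) := by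
  intro h
  rcases List.mem_map.1 h with ⟨s, hs, he⟩
  by_cases h1 : s = "D" <;> by_cases h2 : s = "D'" <;> simp_all

theorem pv_not_mem_map_bad (l : List String) (v : String)
    (hv1 : v ∉ l) (hv2 : v ≠ "1") (hv3 : v ≠ "0") :
    v ∉ l.map (fun s => if s = "D" then "0" else if s = "D'" then "1" else s) := by
  intro h
  rcases List.mem_map.1 h with ⟨s, hs, he⟩
  by_cases h1 : s = "D" <;> by_cases h2 : s = "D'" <;> simp_all

theorem pv_good_no_D (l : List String) (v : String) (hv : v = "D" ∨ v = "D'") :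
    v ∉ l.map (fun s => if s = "D" then "1" else if s = "D'" then "0" else s) := by
  intro h
  rcases List.mem_map.1 h with ⟨s, _, he⟩
  by_cases h1 : s = "D" <;> by_cases h2 : s = "D'" <;> rcases hv with hv | hv <;> simp_all

theorem pv_bad_no_D (l : List String) (v : String) (hv : v = "D" ∨ v = "D'") :
    v ∉ l.map (fun s => if s = "D" then "0" else if s = "D'" then "1" else s) := by
  intro h
  rcases List.mem_map.1 h with ⟨s, _, he⟩
  by_cases h1 : s = "D" <;> by_cases h2 : s = "D'" <;> rcases hv with hv | hv <;> simp_all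

-- on a D/D'-free (and X/U-free) list, A reduces to the parity of the count of '1'
theorem XNOR___py_noD (l : List String) (hX : "X" ∉ l) (hU : "U" ∉ l)
    (hD : "D" ∉ l) (hD' : "D'" ∉ l) :
    XNOR___py l = (if PySem.Int.mod (PySem.List.count l "1") 2 == 0 then "1" else "0") := by
  rw [XNOR___py]
  simp [hX, hU, hD, hD']

-- counts of '1' in the substituted lists
theorem pv_count_good (l : List String) :
    (l.map (fun s => if s = "D" then "1" else if s = "D'" then "0" else s)).count "1"
      = l.count "1" + l.count "D" := by
  induction l with
  | nil => rfl
  | cons x xs ih =>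
    by_cases h1 : x = "D" <;> by_cases h2 : x = "D'" <;>
      simp_all [List.count_cons] <;> omega

theorem pv_count_bad (l : List String) :
    (l.map (fun s => if s = "D" then "0" else if s = "D'" then "1" else s)).count "1"
      = l.count "1" + l.count "D'" := by
  induction l with
  | nil => rfl
  | cons x xs ih =>
    by_cases h1 : x = "D" <;> by_cases h2 : x = "D'" <;>
      simp_all [List.count_cons] <;> omega

-- ===== VERDICT (by name: the statement is the Claim_ definition above) =====
theorem XNOR___py_spec : Claim_equal_XNOR___py := by
  intro l _
  unfold Spec_XNOR___py
  by_cases hX : "X" ∈ l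
  · rw [XNOR___py, XNOR___py_alt]; simp [hX]
  by_cases hU : "U" ∈ l
  · rw [XNOR___py, XNOR___py_alt]; simp [hX, hU]
  by_cases hD : "D" ∈ l ∨ "D'" ∈ l
  · rw [XNOR___py, XNOR___py_alt]
    simp only [hX, hU, hD, if_false, if_true, dif_pos]
    have hg := pvBuildGB_eq_maps l
    have hgood := XNOR___py_noD (pvBuildGB l).1
      (by rw [hg]; exact pv_not_mem_map_good l "X" hX (by decide) (by decide))
      (by rw [hg]; exact pv_not_mem_map_good l "U" hU (by decide) (by decide))
      (by rw [hg]; exact pv_good_no_D l "D" (Or.inl rfl))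
      (by rw [hg]; exact pv_good_no_D l "D'" (Or.inr rfl))
    have hbad := XNOR___py_noD (pvBuildGB l).2
      (by rw [hg]; exact pv_not_mem_map_bad l "X" hX (by decide) (by decide))
      (by rw [hg]; exact pv_not_mem_map_bad l "U" hU (by decide) (by decide))
      (by rw [hg]; exact pv_bad_no_D l "D" (Or.inl rfl))
      (by rw [hg]; exact pv_bad_no_D l "D'" (Or.inr rfl))
    rw [hgood, hbad, hg]
    simp only [PySem.List.count_eq, pv_count_good, pv_count_bad]
    push_cast
    rfl
  · rw [XNOR___py, XNOR___py_alt]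
    simp [hX, hU, hD]
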